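-- pv_equiv track=rewrite | github.com/jbsugden/FootyPredict | src/predictor/engine/zones.py | get_zone_for_position
-- ===== SOURCE A (Python) =====
-- ZONE_CONFIGS: dict[str, list[dict]] = {
--     "PL": [
--         {"label": "Champions League", "positions": [1, 2, 3, 4], "css_class": "zone-ucl"},
--         {"label": "Europa / Conference", "positions": [5, 6], "css_class": "zone-europa"},
--         {"label": "Relegation", "positions": [-3, -2, -1], "css_class": "zone-relegation"},
--     ],
--     "NPL_W": [
--         {"label": "Promotion", "positions": [1], "css_class": "zone-promotion"},
--         {"label": "Relegation", "positions": [-3, -2, -1], "css_class": "zone-relegation"},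
--     ],
-- }
--
-- DEFAULT_ZONES: list[dict] = [
--     {"label": "Champion", "positions": [1], "css_class": "zone-promotion"},
--     {"label": "Relegation", "positions": [-3, -2, -1], "css_class": "zone-relegation"},
-- ]
--
-- def _resolve_positions(positions: list[int], n_teams: int) -> list[int]:
--     """Convert negative position indices to absolute 1-based positions."""
--     resolved = []
--     for p in positions:
--         if p < 0:
--             absolute = n_teams + 1 + p  # -1 → n_teams, -2 → n_teams-1, etc.
--             if absolute >= 1:
--                 resolved.append(absolute)
--         else:
--             if p <= n_teams:
--                 resolved.append(p)
--     return resolved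
--
-- def get_zone_for_position(
--     league_code: str,
--     position: int,
--     n_teams: int,
-- ) -> str | None:
--     """Return the CSS class for a given league position, or ``None``.
--
--     Used by the standings table template to highlight rows by zone.
--
--     Args:
--         league_code: League code.
--         position: 1-based table position.
--         n_teams: Total teams in the league.
--
--     Returns:
--         CSS class string (e.g. ``"zone-ucl"``) or ``None`` if position is not
--         in any defined zone.
--     """
--     zones = ZONE_CONFIGS.get(league_code, DEFAULT_ZONES)
--     for zone in zones:
--         positions = _resolve_positions(zone["positions"], n_teams)
--         if position in positions:
--             return zone["css_class"]
--     return None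
-- ===== SOURCE B (Python) =====
-- ZONE_CONFIGS: dict[str, list[dict]] = {
--     "PL": [
--         {"label": "Champions League", "positions": [1, 2, 3, 4], "css_class": "zone-ucl"},
--         {"label": "Europa / Conference", "positions": [5, 6], "css_class": "zone-europa"},
--         {"label": "Relegation", "positions": [-3, -2, -1], "css_class": "zone-relegation"},
--     ],
--     "NPL_W": [
--         {"label": "Promotion", "positions": [1], "css_class": "zone-promotion"},
--         {"label": "Relegation", "positions": [-3, -2, -1], "css_class": "zone-relegation"},
--     ],
-- }
--
-- DEFAULT_ZONES: list[dict] = [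
--     {"label": "Champion", "positions": [1], "css_class": "zone-promotion"},
--     {"label": "Relegation", "positions": [-3, -2, -1], "css_class": "zone-relegation"},
-- ]
--
--
-- def get_zone_for_position(league_code, position, n_teams):
--     """Precompute a position -> css_class table for the league, then do one lookup.
--
--     Earlier zones win on overlapping resolved positions (setdefault = first wins).
--     """
--     zones = ZONE_CONFIGS.get(league_code, DEFAULT_ZONES)
--     table = {}
--     for zone in zones:
--         css = zone["css_class"]
--         for p in zone["positions"]:
--             absolute = n_teams + 1 + p if p < 0 else p
--             if (absolute >= 1) if p < 0 else (p <= n_teams):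
--                 table.setdefault(absolute, css)
--     return table.get(position)
-- ===== Notes on version B (the rewrite author's own statement) =====
-- stated objective: alternative
-- what changed: B replaces A's per-zone resolve-then-scan with early return by precomputing a position->css lookup table once (dict populated zone by zone with first-wins setdefault) and returning a single table.get(position).
import Mathlib
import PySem

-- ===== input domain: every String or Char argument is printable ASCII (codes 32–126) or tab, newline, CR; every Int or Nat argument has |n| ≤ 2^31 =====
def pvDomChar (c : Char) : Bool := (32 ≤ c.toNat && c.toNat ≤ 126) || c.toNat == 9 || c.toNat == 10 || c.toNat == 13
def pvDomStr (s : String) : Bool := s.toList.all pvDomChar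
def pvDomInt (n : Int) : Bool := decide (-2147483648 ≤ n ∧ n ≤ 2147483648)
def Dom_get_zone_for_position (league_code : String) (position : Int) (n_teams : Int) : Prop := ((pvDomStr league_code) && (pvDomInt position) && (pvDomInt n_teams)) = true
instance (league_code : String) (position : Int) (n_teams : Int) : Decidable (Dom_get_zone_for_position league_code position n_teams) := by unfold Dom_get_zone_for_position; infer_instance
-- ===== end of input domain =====

-- B precomputes a position→css lookup table (first-wins setdefault) and does one lookup,
-- instead of A's per-zone resolve-then-scan with early return; same return value, similar cost.
-- ===== PORT A =====
def pvZoneConfigsA : PySem.Dict String (List (List Int × String)) :=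
  PySem.Dict.ofList
    [("PL", [([1, 2, 3, 4], "zone-ucl"), ([5, 6], "zone-europa"), ([-3, -2, -1], "zone-relegation")]),
     ("NPL_W", [([1], "zone-promotion"), ([-3, -2, -1], "zone-relegation")])]

def pvDefaultZonesA : List (List Int × String) :=
  [([1], "zone-promotion"), ([-3, -2, -1], "zone-relegation")]

-- _resolve_positions
def pvResolvePositions (positions : List Int) (n_teams : Int) : List Int :=
  positions.foldl
    (fun resolved p =>
      if p < 0 then
        let absolute := n_teams + 1 + p
        if absolute ≥ 1 then resolved ++ [absolute] else resolved
      else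
        if p ≤ n_teams then resolved ++ [p] else resolved)
    []

-- the 'for zone in zones' loop with its early return
def pvZoneScan : List (List Int × String) → Int → Int → Option String
  | [], _, _ => none
  | (ps, css) :: rest, position, n_teams =>
    if position ∈ pvResolvePositions ps n_teams then some css
    else pvZoneScan rest position n_teams

def get_zone_for_position (league_code : String) (position : Int) (n_teams : Int) : Option String :=
  pvZoneScan (pvZoneConfigsA.getD league_code pvDefaultZonesA) position n_teams

-- ===== PORT B =====
def pvZoneConfigsB : PySem.Dict String (List (List Int × String)) :=
  PySem.Dict.ofList
    [("PL", [([1, 2, 3, 4], "zone-ucl"), ([5, 6], "zone-europa"), ([-3, -2, -1], "zone-relegation")]),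
     ("NPL_W", [([1], "zone-promotion"), ([-3, -2, -1], "zone-relegation")])]

def pvDefaultZonesB : List (List Int × String) :=
  [([1], "zone-promotion"), ([-3, -2, -1], "zone-relegation")]

-- build the position → css table; earlier zones win via setdefault
def pvBuildTable (zones : List (List Int × String)) (n_teams : Int) : PySem.Dict Int String :=
  zones.foldl
    (fun table zone =>
      zone.1.foldl
        (fun t p =>
          let absolute := if p < 0 then n_teams + 1 + p else p
          if (if p < 0 then absolute ≥ 1 else p ≤ n_teams) then t.setdefault absolute zone.2
          else t)
        table)
    PySem.Dict.empty

def get_zone_for_position_alt (league_code : String) (position : Int) (n_teams : Int) : Option String :=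
  (pvBuildTable (pvZoneConfigsB.getD league_code pvDefaultZonesB) n_teams).get? position

-- ===== PRECONDITION & SPEC =====
def Spec_get_zone_for_position (league_code : String) (position : Int) (n_teams : Int) (out : Option String) : Prop := out = get_zone_for_position_alt league_code position n_teams
instance (league_code : String) (position : Int) (n_teams : Int) (out : Option String) : Decidable (Spec_get_zone_for_position league_code position n_teams out) := by unfold Spec_get_zone_for_position; infer_instance

-- ===== CLAIM (what is proved, stated in full; the proofs are below) =====
def Claim_equal_get_zone_for_position : Prop := ∀ (league_code : String) (position : Int) (n_teams : Int), Dom_get_zone_for_position league_code position n_teams → Spec_get_zone_for_position league_code position n_teams (get_zone_for_position league_code position n_teams)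

-- ===== LEMMAS AND PROOFS =====

-- A's resolved list is the filtered, resolved positions
lemma pvResolve_eq (ps : List Int) (n : Int) :
    pvResolvePositions ps n =
      (ps.filter (fun p => if p < 0 then decide (n + 1 + p ≥ 1) else decide (p ≤ n))).map
        (fun p => if p < 0 then n + 1 + p else p) := by
  unfold pvResolvePositions
  rw [show (fun (resolved : List Int) p =>
      if p < 0 then
        let absolute := n + 1 + p
        if absolute ≥ 1 then resolved ++ [absolute] else resolved
      else
        if p ≤ n then resolved ++ [p] else resolved)
    = (fun acc x =>
        if (fun p => if p < 0 then decide (n + 1 + p ≥ 1) else decide (p ≤ n)) x = true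
        then acc ++ [(fun p => if p < 0 then n + 1 + p else p) x] else acc) from by
      funext acc p; by_cases hp : p < 0 <;> simp [hp]]
  simpa using PySem.List.foldl_append_if
    (fun p => if p < 0 then decide (n + 1 + p ≥ 1) else decide (p ≤ n))
    (fun p => if p < 0 then n + 1 + p else p) ps []

-- peel one position off the resolved-membership test
lemma pvMem_resolve_cons (p : Int) (ps : List Int) (n x : Int) :
    x ∈ pvResolvePositions (p :: ps) n ↔
      (((if p < 0 then n + 1 + p ≥ 1 else p ≤ n)) ∧ (if p < 0 then n + 1 + p else p) = x)
      ∨ x ∈ pvResolvePositions ps n := by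
  simp only [pvResolve_eq, List.filter_cons]
  by_cases hp : p < 0
  · by_cases hc : n + 1 + p ≥ 1 <;> simp [hp, hc, eq_comm (a := x)]
  · by_cases hc : p ≤ n <;> simp [hp, hc, eq_comm (a := x)]

-- one zone's inner setdefault loop, looked up afterwards
lemma pvInner (ps : List Int) (css : String) (n x : Int) (t : PySem.Dict Int String) :
    (ps.foldl
        (fun t p =>
          let absolute := if p < 0 then n + 1 + p else p
          if (if p < 0 then absolute ≥ 1 else p ≤ n) then t.setdefault absolute css else t)
        t).get? x =
      if (t.get? x).isSome then t.get? x
      else if x ∈ pvResolvePositions ps n then some css else none := by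
  induction ps generalizing t with
  | nil =>
    cases h : t.get? x <;> simp [pvResolvePositions, h]
  | cons p ps ih =>
    simp only [List.foldl_cons]
    rw [ih]
    simp only [pvMem_resolve_cons]
    by_cases hp : p < 0 <;> simp only [hp, if_pos, ite_false]
    · by_cases hc : n + 1 + p ≥ 1
      · simp only [hc, ite_true]
        by_cases hx : x = n + 1 + p
        · subst hx
          rw [PySem.Dict.get?_setdefault_self]
          cases h : t.get? (n + 1 + p) <;> simp
        · have heq : (t.setdefault (n + 1 + p) css).get? x = t.get? x := by
            by_cases hctn : t.contains (n + 1 + p)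
            · rw [PySem.Dict.setdefault_of_contains _ _ hctn]
            · rw [PySem.Dict.setdefault_of_not_contains _ _ (by simpa using hctn),
                PySem.Dict.get?_insert_of_ne _ _ hx]
          rw [heq]
          have hxx : ¬ (n + 1 + p = x) := fun h => hx h.symm
          simp [hxx]
      · simp [hc]
    · by_cases hc : p ≤ n
      · simp only [hc, ite_true]
        by_cases hx : x = p
        · subst hx
          rw [PySem.Dict.get?_setdefault_self]
          cases h : t.get? x <;> simp
        · have heq : (t.setdefault p css).get? x = t.get? x := by
            by_cases hctn : t.contains p
            · rw [PySem.Dict.setdefault_of_contains _ _ hctn]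
            · rw [PySem.Dict.setdefault_of_not_contains _ _ (by simpa using hctn),
                PySem.Dict.get?_insert_of_ne _ _ hx]
          rw [heq]
          have hxx : ¬ (p = x) := fun h => hx h.symm
          simp [hxx]
      · simp [hc]

-- B's whole table, looked up afterwards, is A's early-return scan
lemma pvTable (zones : List (List Int × String)) (x n : Int) (t : PySem.Dict Int String) :
    (zones.foldl
        (fun table zone =>
          zone.1.foldl
            (fun t p =>
              let absolute := if p < 0 then n + 1 + p else p
              if (if p < 0 then absolute ≥ 1 else p ≤ n) then t.setdefault absolute zone.2 else t)
            table)
        t).get? x =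
      if (t.get? x).isSome then t.get? x else pvZoneScan zones x n := by
  induction zones generalizing t with
  | nil =>
    cases h : t.get? x <;> simp [pvZoneScan, h]
  | cons z zones ih =>
    obtain ⟨ps, css⟩ := z
    simp only [List.foldl_cons]
    rw [ih, pvInner]
    cases h : t.get? x with
    | some v => simp
    | none =>
      simp only [Option.isSome_none, Bool.false_eq_true, if_false, pvZoneScan]
      by_cases hm : x ∈ pvResolvePositions ps n <;> simp [hm]

-- ===== VERDICT (by name: the statement is the Claim_ definition above) =====
theorem get_zone_for_position_spec : Claim_equal_get_zone_for_position := by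
  intro league_code position n_teams _
  unfold Spec_get_zone_for_position get_zone_for_position get_zone_for_position_alt pvBuildTable
  have hz : pvZoneConfigsB.getD league_code pvDefaultZonesB =
      pvZoneConfigsA.getD league_code pvDefaultZonesA := rfl
  rw [hz, pvTable]
  simp
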